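-- pv_equiv track=rewrite | github.com/utk09/open-appacademy-io | 1_IntroToProgramming/6_Advanced_Problems/17_vowel_cipher.py | vowel_cipher
-- ===== SOURCE A (Python) =====
-- def vowel_cipher(string):
--     vowel = "aeiou"
--     new_str = ""
--     for each_char in string:
--         if each_char in vowel:
--             old_pos = vowel.index(each_char)
--             new_pos = old_pos + 1
--             new_str = new_str + vowel[new_pos % len(vowel)]
--         else:
--             new_str = new_str + each_char
--     return new_str
-- ===== SOURCE B (Python) =====
-- def vowel_cipher(string):
--     vowels = "aeiou"
--     marks = "\x01\x02\x03\x04\x05"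
--     pairs = list(zip(vowels, marks)) + list(zip(marks, vowels[1:] + vowels[:1]))
--     for old, new in pairs:
--         string = string.replace(old, new)
--     return string
-- ===== Notes on version B (the rewrite author's own statement) =====
-- stated objective: alternative
-- what changed: B drops A's single per-character loop (membership test, index search, char-by-char concatenation) and instead runs ten staged whole-string str.replace passes: each vowel is first swapped to a temporary placeholder character, then each placeholder to the next vowel; the passes run at C speed with no per-character Python branching.
import Mathlib
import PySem

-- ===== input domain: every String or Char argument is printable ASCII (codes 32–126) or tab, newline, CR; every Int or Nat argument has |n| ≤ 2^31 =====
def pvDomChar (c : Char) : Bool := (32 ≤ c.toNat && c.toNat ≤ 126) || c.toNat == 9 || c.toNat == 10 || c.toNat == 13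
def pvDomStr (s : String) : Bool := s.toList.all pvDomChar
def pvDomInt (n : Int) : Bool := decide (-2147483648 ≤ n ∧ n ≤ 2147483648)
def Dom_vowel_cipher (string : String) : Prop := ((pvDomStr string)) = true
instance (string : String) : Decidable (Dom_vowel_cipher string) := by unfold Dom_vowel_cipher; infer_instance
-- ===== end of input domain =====

-- B replaces A's single per-character loop (membership test + index search + concatenation)
-- by staged whole-string replace passes through a temporary placeholder alphabet (alternative decomposition).

-- ===== PORT A =====
-- per-character body of A's loop (branch order and intermediate values as in the Python)
def vowelCipherStepA (new_str : List Char) (each_char : Char) : List Char :=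
  let vowel := "aeiou".toList
  if vowel.contains each_char then
    let old_pos : Int := ((PySem.List.index? vowel each_char).getD 0 : Nat)
    let new_pos : Int := old_pos + 1
    new_str ++ [PySem.List.pyGetD vowel (PySem.Int.mod new_pos (vowel.length : Int)) 'a']
  else
    new_str ++ [each_char]

def vowel_cipher (string : String) : String :=
  String.ofList (string.toList.foldl vowelCipherStepA [])

-- ===== PORT B =====
-- pairs = list(zip(vowels, marks)) + list(zip(marks, vowels[1:] + vowels[:1]))
def vowelPairsB : List (Char × Char) :=
  let vowels := "aeiou".toList
  let marks := "\x01\x02\x03\x04\x05".toList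
  vowels.zip marks ++ marks.zip (PySem.List.slice vowels (some 1) ++ PySem.List.slice vowels none (some 1))

-- the for-loop of replace passes: for old, new in pairs: string = string.replace(old, new)
def vowel_cipher_alt (string : String) : String :=
  String.ofList
    (vowelPairsB.foldl (fun s p => PySem.Chars.replace s [p.1] [p.2]) string.toList)

-- ===== PRECONDITION & SPEC =====
def Spec_vowel_cipher (string : String) (out : String) : Prop := out = vowel_cipher_alt string
instance (string : String) (out : String) : Decidable (Spec_vowel_cipher string out) := by unfold Spec_vowel_cipher; infer_instance

-- ===== CLAIM (what is proved, stated in full; the proofs are below) =====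
def Claim_equal_vowel_cipher : Prop := ∀ (string : String), Dom_vowel_cipher string → Spec_vowel_cipher string (vowel_cipher string)

-- ===== LEMMAS AND PROOFS =====

-- the character A's loop body appends for input character c
def charA (c : Char) : Char :=
  let vowel := "aeiou".toList
  if vowel.contains c then
    PySem.List.pyGetD vowel
      (PySem.Int.mod (((PySem.List.index? vowel c).getD 0 : Nat) + 1) (vowel.length : Int)) 'a'
  else c

theorem stepA_append (acc : List Char) (c : Char) :
    vowelCipherStepA acc c = acc ++ [charA c] := by
  unfold vowelCipherStepA charA
  simp only []
  split <;> simp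

theorem foldl_stepA (cs : List Char) (acc : List Char) :
    cs.foldl vowelCipherStepA acc = acc ++ cs.map charA := by
  induction cs generalizing acc with
  | nil => simp
  | cons c cs ih => simp [List.foldl, stepA_append, ih]

-- Python str.replace with a one-character pattern and one-character replacement is a pointwise map
theorem replace_go_single (v m : Char) :
    ∀ (fuel : Nat) (l acc : List Char), l.length ≤ fuel →
      PySem.Chars.replace.go [v] [m] fuel l acc
        = acc.reverse ++ l.map (fun c => if c = v then m else c) := by
  intro fuel
  induction fuel with
  | zero =>
    intro l acc h
    have : l = [] := List.eq_nil_of_length_eq_zero (Nat.le_zero.mp h)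
    subst this; simp [PySem.Chars.replace.go]
  | succ n ih =>
    intro l acc h
    cases l with
    | nil => simp [PySem.Chars.replace.go]
    | cons c t =>
      by_cases hc : c = v
      · subst hc
        have hpre : List.isPrefixOf [c] (c :: t) = true := by
          simp [List.isPrefixOf]
        simp only [PySem.Chars.replace.go, hpre, if_pos]
        rw [show List.drop [c].length (c :: t) = t from rfl,
            show [m].reverse ++ acc = m :: acc from rfl,
            ih t (m :: acc) (by simpa using Nat.lt_succ_iff.mp (by simpa using h))]
        simp
      · have hpre : List.isPrefixOf [v] (c :: t) = false := by
          simp [List.isPrefixOf]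
          exact fun h => hc h.symm
        simp only [PySem.Chars.replace.go, hpre]
        rw [ih t (c :: acc) (by simpa using Nat.lt_succ_iff.mp (by simpa using h))]
        simp [hc]

theorem replace_single (v m : Char) (l : List Char) :
    PySem.Chars.replace l [v] [m] = l.map (fun c => if c = v then m else c) := by
  unfold PySem.Chars.replace
  rw [replace_go_single v m l.length l [] le_rfl]
  simp

-- a chain of single-character replace passes is a map of the chained substitution
theorem foldl_replace_map (ps : List (Char × Char)) (l : List Char) :
    ps.foldl (fun s p => PySem.Chars.replace s [p.1] [p.2]) l
      = l.map (fun c => ps.foldl (fun x p => if x = p.1 then p.2 else x) c) := by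
  induction ps generalizing l with
  | nil => simp
  | cons p ps ih =>
    rw [List.foldl_cons, replace_single, ih, List.map_map]
    rfl

theorem vowelPairsB_eq :
    vowelPairsB = [('a','\x01'),('e','\x02'),('i','\x03'),('o','\x04'),('u','\x05'),
                   ('\x01','e'),('\x02','i'),('\x03','o'),('\x04','u'),('\x05','a')] := by
  decide

-- on domain characters the chained substitution is exactly A's per-character result
theorem chain_eq_charA (c : Char) (hc : pvDomChar c = true) :
    vowelPairsB.foldl (fun x p => if x = p.1 then p.2 else x) c = charA c := by
  by_cases ha : c = 'a'; · subst ha; rw [vowelPairsB_eq]; decide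
  by_cases he : c = 'e'; · subst he; rw [vowelPairsB_eq]; decide
  by_cases hi : c = 'i'; · subst hi; rw [vowelPairsB_eq]; decide
  by_cases ho : c = 'o'; · subst ho; rw [vowelPairsB_eq]; decide
  by_cases hu : c = 'u'; · subst hu; rw [vowelPairsB_eq]; decide
  have hm : ∀ k : Nat, 1 ≤ k → k ≤ 5 → c ≠ Char.ofNat k := by
    intro k h1 h5 hck
    have : c.toNat = k := by rw [hck]; interval_cases k <;> decide
    simp [pvDomChar, this] at hc
    omega
  have h1 := hm 1 (by norm_num) (by norm_num)
  have h2 := hm 2 (by norm_num) (by norm_num)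
  have h3 := hm 3 (by norm_num) (by norm_num)
  have h4 := hm 4 (by norm_num) (by norm_num)
  have h5 := hm 5 (by norm_num) (by norm_num)
  rw [vowelPairsB_eq]
  simp [charA, ha, he, hi, ho, hu,
    show c ≠ '\x01' from h1, show c ≠ '\x02' from h2, show c ≠ '\x03' from h3,
    show c ≠ '\x04' from h4, show c ≠ '\x05' from h5]

-- ===== VERDICT (by name: the statement is the Claim_ definition above) =====
theorem vowel_cipher_spec : Claim_equal_vowel_cipher := by
  intro s hdom
  unfold Dom_vowel_cipher pvDomStr at hdom
  have hall := List.all_eq_true.mp hdom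
  unfold Spec_vowel_cipher vowel_cipher vowel_cipher_alt
  rw [foldl_stepA, foldl_replace_map, List.nil_append,
    List.map_congr_left (fun c hc => (chain_eq_charA c (hall c hc)).symm)]
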